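-- pv_equiv track=rewrite | github.com/BrianMills2718/kgas1 | src/tools/phase1/t31_entity_builder_improved.py | _are_types_compatible
-- ===== SOURCE A (Python) =====
-- def _are_types_compatible(type1: str, type2: str) -> bool:
--     """Check if two entity types are compatible"""
--     compatible_groups = [
--         {"PERSON", "PER"},
--         {"ORG", "ORGANIZATION", "COMPANY"},
--         {"GPE", "LOC", "LOCATION", "PLACE"},
--         {"DATE", "TIME", "DATETIME"},
--         {"PRODUCT", "WORK_OF_ART"}
--     ]
--
--     for group in compatible_groups:
--         if type1 in group and type2 in group:
--             return True
--
--     return False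
-- ===== SOURCE B (Python) =====
-- _TYPE_GROUPS = [
--     ("PERSON", "PER"),
--     ("ORG", "ORGANIZATION", "COMPANY"),
--     ("GPE", "LOC", "LOCATION", "PLACE"),
--     ("DATE", "TIME", "DATETIME"),
--     ("PRODUCT", "WORK_OF_ART"),
-- ]
-- _TYPE_TO_GROUP = {t: i for i, group in enumerate(_TYPE_GROUPS) for t in group}
--
--
-- def _are_types_compatible(type1: str, type2: str) -> bool:
--     """Check if two entity types are compatible"""
--     g1 = _TYPE_TO_GROUP.get(type1)
--     return g1 is not None and g1 == _TYPE_TO_GROUP.get(type2)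
-- ===== Notes on version B (the rewrite author's own statement) =====
-- stated objective: idiomatic
-- what changed: Replaces the per-call loop over five membership-tested sets by a single precomputed type->group-id dict; the check becomes two O(1) lookups with a None guard and no loop.
import Mathlib
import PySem

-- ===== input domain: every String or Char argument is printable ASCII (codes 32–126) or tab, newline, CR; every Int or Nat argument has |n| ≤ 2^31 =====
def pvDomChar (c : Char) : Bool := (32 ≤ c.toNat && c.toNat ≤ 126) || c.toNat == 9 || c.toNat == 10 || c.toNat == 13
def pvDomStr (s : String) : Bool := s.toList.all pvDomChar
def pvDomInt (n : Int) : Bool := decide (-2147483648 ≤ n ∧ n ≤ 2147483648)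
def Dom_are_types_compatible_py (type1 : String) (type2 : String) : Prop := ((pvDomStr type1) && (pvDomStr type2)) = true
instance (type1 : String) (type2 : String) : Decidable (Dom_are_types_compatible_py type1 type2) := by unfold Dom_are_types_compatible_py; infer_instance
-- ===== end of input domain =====

-- B replaces A's per-call loop over five membership-tested sets by a single precomputed
-- type -> group-id dict built once; the check is two lookups with a None guard (idiomatic).

-- ===== PORT A =====
def pvGroupsA : List (PySem.Set String) :=
  [PySem.Set.ofList ["PERSON", "PER"],
   PySem.Set.ofList ["ORG", "ORGANIZATION", "COMPANY"],
   PySem.Set.ofList ["GPE", "LOC", "LOCATION", "PLACE"],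
   PySem.Set.ofList ["DATE", "TIME", "DATETIME"],
   PySem.Set.ofList ["PRODUCT", "WORK_OF_ART"]]

-- A's 'for group in compatible_groups: if type1 in group and type2 in group: return True', step for step
def pvLoopA (type1 type2 : String) : List (PySem.Set String) → Bool
  | [] => false
  | g :: rest =>
      if PySem.Set.contains g type1 && PySem.Set.contains g type2 then true
      else pvLoopA type1 type2 rest

def are_types_compatible_py (type1 : String) (type2 : String) : Bool :=
  pvLoopA type1 type2 pvGroupsA

-- ===== PORT B =====
def pvTypeGroupsB : List (List String) :=
  [["PERSON", "PER"],
   ["ORG", "ORGANIZATION", "COMPANY"],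
   ["GPE", "LOC", "LOCATION", "PLACE"],
   ["DATE", "TIME", "DATETIME"],
   ["PRODUCT", "WORK_OF_ART"]]

-- {t: i for i, group in enumerate(_TYPE_GROUPS) for t in group}
def pvTypeToGroupB : PySem.Dict String Int :=
  (PySem.List.enumerate pvTypeGroupsB).foldl
    (fun d p => p.2.foldl (fun d t => d.insert t p.1) d) PySem.Dict.empty

-- g1 = _TYPE_TO_GROUP.get(type1); return g1 is not None and g1 == _TYPE_TO_GROUP.get(type2)
def are_types_compatible_py_alt (type1 : String) (type2 : String) : Bool :=
  let g1 := pvTypeToGroupB.get? type1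
  g1.isSome && (g1 == pvTypeToGroupB.get? type2)

-- ===== PRECONDITION & SPEC =====
def Spec_are_types_compatible_py (type1 : String) (type2 : String) (out : Bool) : Prop := out = are_types_compatible_py_alt type1 type2
instance (type1 : String) (type2 : String) (out : Bool) : Decidable (Spec_are_types_compatible_py type1 type2 out) := by unfold Spec_are_types_compatible_py; infer_instance

-- ===== CLAIM (what is proved, stated in full; the proofs are below) =====
def Claim_equal_are_types_compatible_py : Prop := ∀ (type1 : String) (type2 : String), Dom_are_types_compatible_py type1 type2 → Spec_are_types_compatible_py type1 type2 (are_types_compatible_py type1 type2)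

-- ===== LEMMAS AND PROOFS =====

-- B's dict, evaluated once: every group member maps to its group index
theorem pvTab : pvTypeToGroupB = PySem.Dict.mk
    [("PERSON", 0), ("PER", 0), ("ORG", 1), ("ORGANIZATION", 1), ("COMPANY", 1),
     ("GPE", 2), ("LOC", 2), ("LOCATION", 2), ("PLACE", 2),
     ("DATE", 3), ("TIME", 3), ("DATETIME", 3),
     ("PRODUCT", 4), ("WORK_OF_ART", 4)] := by decide

-- membership in the i-th of A's groups is exactly 'B's dict maps t to i' (groups are disjoint)
theorem pvKey (t : String) :
    (PySem.Set.contains (PySem.Set.ofList ["PERSON", "PER"]) t = decide (pvTypeToGroupB.get? t = some 0)) ∧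
    (PySem.Set.contains (PySem.Set.ofList ["ORG", "ORGANIZATION", "COMPANY"]) t = decide (pvTypeToGroupB.get? t = some 1)) ∧
    (PySem.Set.contains (PySem.Set.ofList ["GPE", "LOC", "LOCATION", "PLACE"]) t = decide (pvTypeToGroupB.get? t = some 2)) ∧
    (PySem.Set.contains (PySem.Set.ofList ["DATE", "TIME", "DATETIME"]) t = decide (pvTypeToGroupB.get? t = some 3)) ∧
    (PySem.Set.contains (PySem.Set.ofList ["PRODUCT", "WORK_OF_ART"]) t = decide (pvTypeToGroupB.get? t = some 4)) := by
  by_cases h1 : t = "PERSON"; · subst h1; decide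
  by_cases h2 : t = "PER"; · subst h2; decide
  by_cases h3 : t = "ORG"; · subst h3; decide
  by_cases h4 : t = "ORGANIZATION"; · subst h4; decide
  by_cases h5 : t = "COMPANY"; · subst h5; decide
  by_cases h6 : t = "GPE"; · subst h6; decide
  by_cases h7 : t = "LOC"; · subst h7; decide
  by_cases h8 : t = "LOCATION"; · subst h8; decide
  by_cases h9 : t = "PLACE"; · subst h9; decide
  by_cases h10 : t = "DATE"; · subst h10; decide
  by_cases h11 : t = "TIME"; · subst h11; decide
  by_cases h12 : t = "DATETIME"; · subst h12; decide
  by_cases h13 : t = "PRODUCT"; · subst h13; decide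
  by_cases h14 : t = "WORK_OF_ART"; · subst h14; decide
  have e1 : (("PERSON" : String) == t) = false := beq_eq_false_iff_ne.mpr (Ne.symm h1)
  have f1 : (t == ("PERSON" : String)) = false := beq_eq_false_iff_ne.mpr h1
  have e2 : (("PER" : String) == t) = false := beq_eq_false_iff_ne.mpr (Ne.symm h2)
  have f2 : (t == ("PER" : String)) = false := beq_eq_false_iff_ne.mpr h2
  have e3 : (("ORG" : String) == t) = false := beq_eq_false_iff_ne.mpr (Ne.symm h3)
  have f3 : (t == ("ORG" : String)) = false := beq_eq_false_iff_ne.mpr h3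
  have e4 : (("ORGANIZATION" : String) == t) = false := beq_eq_false_iff_ne.mpr (Ne.symm h4)
  have f4 : (t == ("ORGANIZATION" : String)) = false := beq_eq_false_iff_ne.mpr h4
  have e5 : (("COMPANY" : String) == t) = false := beq_eq_false_iff_ne.mpr (Ne.symm h5)
  have f5 : (t == ("COMPANY" : String)) = false := beq_eq_false_iff_ne.mpr h5
  have e6 : (("GPE" : String) == t) = false := beq_eq_false_iff_ne.mpr (Ne.symm h6)
  have f6 : (t == ("GPE" : String)) = false := beq_eq_false_iff_ne.mpr h6
  have e7 : (("LOC" : String) == t) = false := beq_eq_false_iff_ne.mpr (Ne.symm h7)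
  have f7 : (t == ("LOC" : String)) = false := beq_eq_false_iff_ne.mpr h7
  have e8 : (("LOCATION" : String) == t) = false := beq_eq_false_iff_ne.mpr (Ne.symm h8)
  have f8 : (t == ("LOCATION" : String)) = false := beq_eq_false_iff_ne.mpr h8
  have e9 : (("PLACE" : String) == t) = false := beq_eq_false_iff_ne.mpr (Ne.symm h9)
  have f9 : (t == ("PLACE" : String)) = false := beq_eq_false_iff_ne.mpr h9
  have e10 : (("DATE" : String) == t) = false := beq_eq_false_iff_ne.mpr (Ne.symm h10)
  have f10 : (t == ("DATE" : String)) = false := beq_eq_false_iff_ne.mpr h10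
  have e11 : (("TIME" : String) == t) = false := beq_eq_false_iff_ne.mpr (Ne.symm h11)
  have f11 : (t == ("TIME" : String)) = false := beq_eq_false_iff_ne.mpr h11
  have e12 : (("DATETIME" : String) == t) = false := beq_eq_false_iff_ne.mpr (Ne.symm h12)
  have f12 : (t == ("DATETIME" : String)) = false := beq_eq_false_iff_ne.mpr h12
  have e13 : (("PRODUCT" : String) == t) = false := beq_eq_false_iff_ne.mpr (Ne.symm h13)
  have f13 : (t == ("PRODUCT" : String)) = false := beq_eq_false_iff_ne.mpr h13
  have e14 : (("WORK_OF_ART" : String) == t) = false := beq_eq_false_iff_ne.mpr (Ne.symm h14)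
  have f14 : (t == ("WORK_OF_ART" : String)) = false := beq_eq_false_iff_ne.mpr h14
  rw [pvTab]
  simp [PySem.Dict.get?_mk_cons, PySem.Set.contains, PySem.Set.ofList, e1, f1, e2, f2, e3, f3, e4, f4, e5, f5, e6, f6, e7, f7, e8, f8, e9, f9, e10, f10, e11, f11, e12, f12, e13, f13, e14, f14, h1, h2, h3, h4, h5, h6, h7, h8, h9, h10, h11, h12, h13, h14, PySem.Dict.get?, List.find?]

-- B's lookup takes one of six values
theorem pvGetCases (t : String) :
    pvTypeToGroupB.get? t = none ∨ pvTypeToGroupB.get? t = some 0 ∨ pvTypeToGroupB.get? t = some 1 ∨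
    pvTypeToGroupB.get? t = some 2 ∨ pvTypeToGroupB.get? t = some 3 ∨ pvTypeToGroupB.get? t = some 4 := by
  by_cases h1 : t = "PERSON"; · subst h1; decide
  by_cases h2 : t = "PER"; · subst h2; decide
  by_cases h3 : t = "ORG"; · subst h3; decide
  by_cases h4 : t = "ORGANIZATION"; · subst h4; decide
  by_cases h5 : t = "COMPANY"; · subst h5; decide
  by_cases h6 : t = "GPE"; · subst h6; decide
  by_cases h7 : t = "LOC"; · subst h7; decide
  by_cases h8 : t = "LOCATION"; · subst h8; decide
  by_cases h9 : t = "PLACE"; · subst h9; decide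
  by_cases h10 : t = "DATE"; · subst h10; decide
  by_cases h11 : t = "TIME"; · subst h11; decide
  by_cases h12 : t = "DATETIME"; · subst h12; decide
  by_cases h13 : t = "PRODUCT"; · subst h13; decide
  by_cases h14 : t = "WORK_OF_ART"; · subst h14; decide
  have e1 : (("PERSON" : String) == t) = false := beq_eq_false_iff_ne.mpr (Ne.symm h1)
  have f1 : (t == ("PERSON" : String)) = false := beq_eq_false_iff_ne.mpr h1
  have e2 : (("PER" : String) == t) = false := beq_eq_false_iff_ne.mpr (Ne.symm h2)
  have f2 : (t == ("PER" : String)) = false := beq_eq_false_iff_ne.mpr h2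
  have e3 : (("ORG" : String) == t) = false := beq_eq_false_iff_ne.mpr (Ne.symm h3)
  have f3 : (t == ("ORG" : String)) = false := beq_eq_false_iff_ne.mpr h3
  have e4 : (("ORGANIZATION" : String) == t) = false := beq_eq_false_iff_ne.mpr (Ne.symm h4)
  have f4 : (t == ("ORGANIZATION" : String)) = false := beq_eq_false_iff_ne.mpr h4
  have e5 : (("COMPANY" : String) == t) = false := beq_eq_false_iff_ne.mpr (Ne.symm h5)
  have f5 : (t == ("COMPANY" : String)) = false := beq_eq_false_iff_ne.mpr h5
  have e6 : (("GPE" : String) == t) = false := beq_eq_false_iff_ne.mpr (Ne.symm h6)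
  have f6 : (t == ("GPE" : String)) = false := beq_eq_false_iff_ne.mpr h6
  have e7 : (("LOC" : String) == t) = false := beq_eq_false_iff_ne.mpr (Ne.symm h7)
  have f7 : (t == ("LOC" : String)) = false := beq_eq_false_iff_ne.mpr h7
  have e8 : (("LOCATION" : String) == t) = false := beq_eq_false_iff_ne.mpr (Ne.symm h8)
  have f8 : (t == ("LOCATION" : String)) = false := beq_eq_false_iff_ne.mpr h8
  have e9 : (("PLACE" : String) == t) = false := beq_eq_false_iff_ne.mpr (Ne.symm h9)
  have f9 : (t == ("PLACE" : String)) = false := beq_eq_false_iff_ne.mpr h9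
  have e10 : (("DATE" : String) == t) = false := beq_eq_false_iff_ne.mpr (Ne.symm h10)
  have f10 : (t == ("DATE" : String)) = false := beq_eq_false_iff_ne.mpr h10
  have e11 : (("TIME" : String) == t) = false := beq_eq_false_iff_ne.mpr (Ne.symm h11)
  have f11 : (t == ("TIME" : String)) = false := beq_eq_false_iff_ne.mpr h11
  have e12 : (("DATETIME" : String) == t) = false := beq_eq_false_iff_ne.mpr (Ne.symm h12)
  have f12 : (t == ("DATETIME" : String)) = false := beq_eq_false_iff_ne.mpr h12
  have e13 : (("PRODUCT" : String) == t) = false := beq_eq_false_iff_ne.mpr (Ne.symm h13)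
  have f13 : (t == ("PRODUCT" : String)) = false := beq_eq_false_iff_ne.mpr h13
  have e14 : (("WORK_OF_ART" : String) == t) = false := beq_eq_false_iff_ne.mpr (Ne.symm h14)
  have f14 : (t == ("WORK_OF_ART" : String)) = false := beq_eq_false_iff_ne.mpr h14
  left
  rw [pvTab]
  simp [PySem.Dict.get?_mk_cons, e1, f1, e2, f2, e3, f3, e4, f4, e5, f5, e6, f6, e7, f7, e8, f8, e9, f9, e10, f10, e11, f11, e12, f12, e13, f13, e14, f14, PySem.Dict.get?, List.find?]

-- ===== VERDICT (by name: the statement is the Claim_ definition above) =====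
theorem are_types_compatible_py_spec : Claim_equal_are_types_compatible_py := by
  intro t1 t2 _
  unfold Spec_are_types_compatible_py are_types_compatible_py are_types_compatible_py_alt
  obtain ⟨a0, a1, a2, a3, a4⟩ := pvKey t1
  obtain ⟨b0, b1, b2, b3, b4⟩ := pvKey t2
  simp only [pvGroupsA, pvLoopA, a0, a1, a2, a3, a4, b0, b1, b2, b3, b4]
  rcases pvGetCases t1 with hx | hx | hx | hx | hx | hx <;>
    rcases pvGetCases t2 with hy | hy | hy | hy | hy | hy <;>
      rw [hx, hy] <;> rfl
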